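-- pv_equiv track=rewrite | github.com/wonchul-kim/robot_sim | robot_sim/isaaclab/utils/articulations.py | _resolve_ee_index
-- ===== SOURCE A (Python) =====
-- def _resolve_ee_index(name_list, ee_name="tool0"):
--     if ee_name in name_list:
--         return name_list.index(ee_name)
--     for i, n in enumerate(name_list):
--         last = n.split("/")[-1]
--         if last == ee_name or n.endswith("/"+ee_name):
--             return i
--     aliases = [ee_name, ee_name+"_link", "tcp", "ee_link", "end_effector", "EE", "Tool0", "TOOL0"]
--     for alias in aliases:
--         for i, n in enumerate(name_list):
--             last = n.split("/")[-1]
--             if last == alias or n.endswith("/"+alias):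
--                 return i
--     raise ValueError(f"Could not find ee link by name '{ee_name}'. Sample names: {name_list[:10]} ... (total {len(name_list)})")
-- ===== SOURCE B (Python) =====
-- def _resolve_ee_index(name_list, ee_name="tool0"):
--     if ee_name in name_list:
--         return name_list.index(ee_name)
--     aliases = [ee_name, ee_name + "_link", "tcp", "ee_link", "end_effector", "EE", "Tool0", "TOOL0"]
--     # single pass over name_list: keep the lexicographically smallest (alias_rank, index)
--     best = None  # (alias_rank, index)
--     for i, n in enumerate(name_list):
--         last = n.split("/")[-1]
--         r = next((r for r, a in enumerate(aliases) if last == a or n.endswith("/" + a)), None)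
--         if r is not None and (best is None or r < best[0]):
--             best = (r, i)
--     if best is None:
--         raise ValueError(f"Could not find ee link by name '{ee_name}'. Sample names: {name_list[:10]} ... (total {len(name_list)})")
--     return best[1]
-- ===== Notes on version B (the rewrite author's own statement) =====
-- stated objective: alternative
-- what changed: A rescans name_list once per alias in priority order (up to 8 ordered scans plus a separate second pass); B makes ONE pass over name_list, computes each name's first matching alias rank, and keeps the lexicographically smallest (rank, index) pair.
import Mathlib
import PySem

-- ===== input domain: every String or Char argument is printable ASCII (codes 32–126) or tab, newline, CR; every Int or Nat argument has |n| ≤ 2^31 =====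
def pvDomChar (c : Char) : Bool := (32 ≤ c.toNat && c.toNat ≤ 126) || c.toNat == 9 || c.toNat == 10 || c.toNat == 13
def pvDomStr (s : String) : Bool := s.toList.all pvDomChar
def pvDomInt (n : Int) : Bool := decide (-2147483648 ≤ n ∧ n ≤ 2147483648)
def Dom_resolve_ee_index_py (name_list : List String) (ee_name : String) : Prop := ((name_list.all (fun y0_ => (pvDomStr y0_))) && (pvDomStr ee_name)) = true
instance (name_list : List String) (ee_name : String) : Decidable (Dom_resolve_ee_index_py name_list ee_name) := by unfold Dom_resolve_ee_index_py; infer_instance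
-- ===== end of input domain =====

-- B replaces A's ordered alias-by-alias rescans of name_list by ONE pass over name_list that keeps
-- the lexicographically smallest (alias_rank, index) pair — objective: alternative (different traversal).
-- Python A raises ValueError when nothing matches: those inputs are excluded by Pre_.

-- ===== PORT A =====

-- the match condition both Pythons use verbatim: n.split("/")[-1] == a or n.endswith("/" + a)
def eeCond (n a : String) : Bool :=
  (PySem.List.pyGetD ((PySem.Str.split? n "/").getD []) (-1) "" == a) || PySem.Str.endswith n ("/" ++ a)

-- the alias list both Pythons build verbatim
def eeAliases (ee : String) : List String :=
  [ee, ee ++ "_link", "tcp", "ee_link", "end_effector", "EE", "Tool0", "TOOL0"]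

-- A: "for i, n in enumerate(name_list): if cond: return i"
def aScan (a : String) : List String → Nat → Option Nat
  | [], _ => none
  | n :: rest, i => if eeCond n a then some i else aScan a rest (i + 1)

-- A: "for alias in aliases: for i, n in enumerate(name_list): …"
def aAliasLoop (names : List String) : List String → Option Nat
  | [] => none
  | a :: rest =>
    match aScan a names 0 with
    | some i => some i
    | none => aAliasLoop names rest

def resolve_ee_index_py (name_list : List String) (ee_name : String) : Int :=
  if name_list.contains ee_name then
    ((PySem.List.index? name_list ee_name).getD 0 : Int)
  else
    match aScan ee_name name_list 0 with
    | some i => (i : Int)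
    | none =>
      match aAliasLoop name_list (eeAliases ee_name) with
      | some i => (i : Int)
      | none => -1  -- Python raises ValueError here; excluded by Pre_

-- ===== PORT B =====

-- B: first alias rank matched by n (next(… for r, a in enumerate(aliases) …))
def bRank (als : List String) (n : String) : Option Nat :=
  als.findIdx? (fun a => eeCond n a)

-- B: "for i, n in enumerate(name_list): … if r is not None and (best is None or r < best[0]): best = (r, i)"
def bLoop (als : List String) : List String → Nat → Option (Nat × Nat) → Option (Nat × Nat)
  | [], _, best => best
  | n :: rest, i, best =>
    let best' :=
      match bRank als n with
      | none => best
      | some r =>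
        match best with
        | none => some (r, i)
        | some (br, bi) => if r < br then some (r, i) else some (br, bi)
    bLoop als rest (i + 1) best'

def resolve_ee_index_py_alt (name_list : List String) (ee_name : String) : Int :=
  match PySem.List.index? name_list ee_name with
  | some i => (i : Int)
  | none =>
    match bLoop (eeAliases ee_name) name_list 0 none with
    | some (_, i) => (i : Int)
    | none => -1  -- Python raises ValueError here; excluded by Pre_

-- ===== PRECONDITION & SPEC =====
-- Pre_ excludes exactly the inputs on which Python A raises ValueError: no exact match and no
-- name matching any alias by last-component or "/"-suffix.
def Pre_resolve_ee_index_py (name_list : List String) (ee_name : String) : Prop :=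
  ee_name ∈ name_list ∨ ∃ a ∈ eeAliases ee_name, ∃ n ∈ name_list, eeCond n a = true
instance (name_list : List String) (ee_name : String) : Decidable (Pre_resolve_ee_index_py name_list ee_name) := by unfold Pre_resolve_ee_index_py; infer_instance

def pvWitness_resolve_ee_index_py : List String × String := (["base", "robot/tool0"], "tool0")

def Spec_resolve_ee_index_py (name_list : List String) (ee_name : String) (out : Int) : Prop := out = resolve_ee_index_py_alt name_list ee_name
instance (name_list : List String) (ee_name : String) (out : Int) : Decidable (Spec_resolve_ee_index_py name_list ee_name out) := by unfold Spec_resolve_ee_index_py; infer_instance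

-- ===== CLAIM (what is proved, stated in full; the proofs are below) =====
def Claim_equal_resolve_ee_index_py : Prop := ∀ (name_list : List String) (ee_name : String), Dom_resolve_ee_index_py name_list ee_name → Pre_resolve_ee_index_py name_list ee_name → Spec_resolve_ee_index_py name_list ee_name (resolve_ee_index_py name_list ee_name)

-- ===== LEMMAS AND PROOFS =====

theorem bRank_cons_true {n a : String} (rest : List String) (h : eeCond n a = true) :
    bRank (a :: rest) n = some 0 := by
  simp [bRank, List.findIdx?_cons, h]

theorem bRank_cons_false {n a : String} (rest : List String) (h : eeCond n a = false) :
    bRank (a :: rest) n = (bRank rest n).map (· + 1) := by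
  simp [bRank, List.findIdx?_cons, h]

theorem bLoop_nil_aliases (names : List String) (i : Nat) (best : Option (Nat × Nat)) :
    bLoop [] names i best = best := by
  induction names generalizing i best with
  | nil => rfl
  | cons n rest ih => simp [bLoop, bRank, ih]

-- once rank 0 is in the accumulator it never changes
theorem bLoop_keep_zero (als names : List String) (i bi : Nat) :
    bLoop als names i (some (0, bi)) = some (0, bi) := by
  induction names generalizing i with
  | nil => rfl
  | cons n rest ih =>
    simp only [bLoop]
    cases h : bRank als n <;> simp [ih]

-- when A's scan for the FIRST alias hits index j, B's single pass returns (0, j)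
theorem bLoop_hit (a : String) (rest names : List String) (i j : Nat)
    (best : Option (Nat × Nat)) (hb : ∀ br bi, best = some (br, bi) → 0 < br)
    (h : aScan a names i = some j) :
    bLoop (a :: rest) names i best = some (0, j) := by
  induction names generalizing i best with
  | nil => simp [aScan] at h
  | cons n ns ih =>
    simp only [aScan] at h
    simp only [bLoop]
    by_cases hc : eeCond n a = true
    · simp [hc] at h
      subst h
      rw [bRank_cons_true rest hc]
      cases best with
      | none => exact bLoop_keep_zero _ _ _ _
      | some p =>
        obtain ⟨br, bi⟩ := p
        have : 0 < br := hb br bi rfl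
        simp only [if_pos this]
        exact bLoop_keep_zero _ _ _ _
    · have hc' : eeCond n a = false := by simpa using hc
      simp [hc'] at h
      rw [bRank_cons_false rest hc']
      cases hr : bRank rest n with
      | none =>
        simp only [Option.map_none]
        exact ih _ _ hb h
      | some r =>
        simp only [Option.map_some]
        cases best with
        | none => exact ih _ _ (by intro br bi hbe; cases hbe; omega) h
        | some p =>
          obtain ⟨br, bi⟩ := p
          by_cases hlt : r + 1 < br
          · simp only [if_pos hlt]
            exact ih _ _ (by intro br' bi' hbe; cases hbe; omega) h
          · simp only [if_neg hlt]
            exact ih _ _ hb h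

-- when no name matches the first alias, dropping it just shifts every rank by one
theorem bLoop_shift (a : String) (rest names : List String) (i : Nat)
    (best : Option (Nat × Nat)) (h : ∀ n ∈ names, eeCond n a = false) :
    bLoop (a :: rest) names i (best.map (fun p => (p.1 + 1, p.2)))
      = (bLoop rest names i best).map (fun p => (p.1 + 1, p.2)) := by
  induction names generalizing i best with
  | nil => rfl
  | cons n ns ih =>
    have hn : eeCond n a = false := h n (by simp)
    have hrest : ∀ m ∈ ns, eeCond m a = false := fun m hm => h m (by simp [hm])
    simp only [bLoop]
    rw [bRank_cons_false rest hn]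
    cases hr : bRank rest n with
    | none =>
      simp only [Option.map_none]
      exact ih (i + 1) best hrest
    | some r =>
      simp only [Option.map_some]
      cases best with
      | none =>
        simp only [Option.map_none]
        exact ih (i + 1) (some (r, i)) hrest
      | some p =>
        obtain ⟨br, bi⟩ := p
        simp only [Option.map_some]
        by_cases hlt : r < br
        · rw [if_pos (by omega : r + 1 < br + 1), if_pos hlt]
          exact ih (i + 1) (some (r, i)) hrest
        · rw [if_neg (by omega : ¬ (r + 1 < br + 1)), if_neg hlt]
          exact ih (i + 1) (some (br, bi)) hrest

theorem aScan_none (a : String) (names : List String) (i : Nat)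
    (h : aScan a names i = none) : ∀ n ∈ names, eeCond n a = false := by
  induction names generalizing i with
  | nil => intro n hn; simp at hn
  | cons n ns ih =>
    simp only [aScan] at h
    by_cases hc : eeCond n a = true
    · simp [hc] at h
    · intro m hm
      rw [List.mem_cons] at hm
      rcases hm with rfl | hm'
      · simpa using hc
      · exact ih (i + 1) (by simpa [hc] using h) m hm' 

-- core: A's alias-ordered first hit equals the index of B's lexicographic minimum
theorem core (als names : List String) :
    aAliasLoop names als = (bLoop als names 0 none).map (·.2) := by
  induction als with
  | nil => simp [aAliasLoop, bLoop_nil_aliases]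
  | cons a rest ih =>
    simp only [aAliasLoop]
    cases h : aScan a names 0 with
    | some j =>
      rw [bLoop_hit a rest names 0 j none (by intro _ _ h; cases h) h]
      rfl
    | none =>
      have hshift := bLoop_shift a rest names 0 none (aScan_none a names 0 h)
      simp only [Option.map_none] at hshift
      rw [hshift, ih, Option.map_map]
      rfl

-- folding A's second pass (ee_name scan) into the head of its alias loop
theorem aChain (names : List String) (ee : String) :
    (match aScan ee names 0 with
      | some i => (i : Int)
      | none =>
        match aAliasLoop names (eeAliases ee) with
        | some i => (i : Int)
        | none => -1)
    = (match aAliasLoop names (eeAliases ee) with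
        | some i => (i : Int)
        | none => -1) := by
  cases h : aScan ee names 0 with
  | some j => simp [eeAliases, aAliasLoop, h]
  | none => rfl

-- ===== VERDICT (by name: the statement is the Claim_ definition above) =====
theorem resolve_ee_index_py_spec : Claim_equal_resolve_ee_index_py := by
  intro names ee _ _
  unfold Spec_resolve_ee_index_py resolve_ee_index_py resolve_ee_index_py_alt
  cases hidx : PySem.List.index? names ee with
  | some k =>
    have hmem : ee ∈ names := by
      by_contra hm
      rw [(PySem.List.index?_eq_none_iff names ee).mpr hm] at hidx
      cases hidx
    simp
    exact fun hx => absurd hmem hx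
  | none =>
    have hnm : ee ∉ names := (PySem.List.index?_eq_none_iff names ee).mp hidx
    have hcont : names.contains ee = false := by simpa using hnm
    simp only [hcont, Bool.false_eq_true, ite_false]
    rw [aChain, core]
    cases bLoop (eeAliases ee) names 0 none with
    | none => rfl
    | some p => rfl
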